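-- pv_equiv track=rewrite | github.com/EricWay1024/aoc2024 | no-rust/22-1.py | get_2000th_secret
-- ===== SOURCE A (Python) =====
-- def get_2000th_secret(initial):
--     s = initial
--     for _ in range(2000):
--         s = (s * 64) ^ s
--         s %= 16777216
--         s = s ^ (s // 32)
--         s %= 16777216
--         s = (s * 2048) ^ s
--         s %= 16777216
--     return s
-- ===== SOURCE B (Python) =====
-- MASK = 0xFFFFFF
--
--
-- def _step(s):
--     s = ((s << 6) ^ s) & MASK
--     s = ((s >> 5) ^ s) & MASK
--     s = ((s << 11) ^ s) & MASK
--     return s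
--
--
-- def _apply(cols, v):
--     r = 0
--     for m in cols:
--         if v & 1:
--             r ^= m
--         v >>= 1
--     return r
--
--
-- def _mat_mul(a, b):
--     return [_apply(a, c) for c in b]
--
--
-- def _mat_pow(m, e):
--     if e == 0:
--         return [1 << i for i in range(24)]
--     h = _mat_pow(m, e >> 1)
--     h2 = _mat_mul(h, h)
--     return _mat_mul(m, h2) if e & 1 else h2
--
--
-- _T2000 = _mat_pow([_step(1 << i) for i in range(24)], 2000)
--
--
-- def get_2000th_secret(initial):
--     return _apply(_T2000, initial & MASK)
-- ===== Notes on version B (the rewrite author's own statement) =====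
-- stated objective: faster
-- what changed: Each PRNG round is linear over GF(2) on the 24-bit state, so B builds the 24-column bit-matrix of one round, raises it to the 2000th power by squaring (computed once at module load), and answers each call with a single matrix-vector apply to initial & 0xFFFFFF instead of running the 2000-round sequential loop.
import Mathlib
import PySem

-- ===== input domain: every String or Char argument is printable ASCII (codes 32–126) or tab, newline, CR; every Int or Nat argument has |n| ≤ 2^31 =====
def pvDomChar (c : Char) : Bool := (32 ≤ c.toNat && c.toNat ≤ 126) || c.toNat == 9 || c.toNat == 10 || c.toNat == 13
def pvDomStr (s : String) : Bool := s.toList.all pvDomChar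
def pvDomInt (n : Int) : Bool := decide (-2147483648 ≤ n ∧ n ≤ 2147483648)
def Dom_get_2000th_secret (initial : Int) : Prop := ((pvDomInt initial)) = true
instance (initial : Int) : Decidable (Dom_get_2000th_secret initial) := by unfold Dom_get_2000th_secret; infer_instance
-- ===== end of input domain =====

-- B re-implements the PRNG step as a linear map over GF(2) on 24-bit states: it builds the
-- 24-column bit-matrix of one step, raises it to the 2000th power by squaring, and applies the
-- precomputed operator once to `initial & 0xFFFFFF` (objective: faster per call).

-- ===== PORT A =====
def get_2000th_secret (initial : Int) : Int :=
  (PySem.List.pyRange 0 2000 1).foldl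
    (fun s _ =>
      let s1 := PySem.Int.mod (PySem.Int.bxor (s * 64) s) 16777216
      let s2 := PySem.Int.mod (PySem.Int.bxor s1 (PySem.Int.floordiv s1 32)) 16777216
      PySem.Int.mod (PySem.Int.bxor (s2 * 2048) s2) 16777216)
    initial

-- ===== PORT B =====
def pvMASK : Int := 0xFFFFFF

def pvStep (s : Int) : Int :=
  let a := PySem.Int.band (PySem.Int.bxor (s <<< (6 : Nat)) s) pvMASK
  let b := PySem.Int.band (PySem.Int.bxor (a >>> (5 : Nat)) a) pvMASK
  PySem.Int.band (PySem.Int.bxor (b <<< (11 : Nat)) b) pvMASK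

def pvApplyF (st : Int × Int) (m : Int) : Int × Int :=
  ((if PySem.Int.band st.2 1 ≠ 0 then PySem.Int.bxor st.1 m else st.1), st.2 >>> (1 : Nat))

def pvApply (cols : List Int) (v : Int) : Int :=
  (cols.foldl pvApplyF (0, v)).1

def pvMatMul (a b : List Int) : List Int := b.map (fun c => pvApply a c)

def pvMatPow (m : List Int) (e : Nat) : List Int :=
  if h : e = 0 then (List.range 24).map (fun i => (1 : Int) <<< (i : Nat))
  else
    let hm := pvMatPow m (e / 2)
    let h2 := pvMatMul hm hm
    if e % 2 = 1 then pvMatMul m h2 else h2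
termination_by e
decreasing_by exact Nat.div_lt_self (Nat.pos_of_ne_zero h) one_lt_two

def pvT : List Int := (List.range 24).map (fun i => pvStep ((1 : Int) <<< (i : Nat)))

def pvT2000 : List Int := pvMatPow pvT 2000

def get_2000th_secret_alt (initial : Int) : Int :=
  pvApply pvT2000 (PySem.Int.band initial pvMASK)

-- ===== PRECONDITION & SPEC =====
def Spec_get_2000th_secret (initial : Int) (out : Int) : Prop := out = get_2000th_secret_alt initial
instance (initial : Int) (out : Int) : Decidable (Spec_get_2000th_secret initial out) := by unfold Spec_get_2000th_secret; infer_instance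

-- ===== CLAIM (what is proved, stated in full; the proofs are below) =====
def Claim_equal_get_2000th_secret : Prop := ∀ (initial : Int), Dom_get_2000th_secret initial → Spec_get_2000th_secret initial (get_2000th_secret initial)

-- ===== LEMMAS AND PROOFS =====

-- the Nat-level single round on 24-bit states, the shared reference of both ports
def nA (t : Nat) : Nat := ((t <<< 6) ^^^ t) % 16777216
def nB (t : Nat) : Nat := (nA t ^^^ (nA t >>> 5)) % 16777216
def nstep (t : Nat) : Nat := ((nB t <<< 11) ^^^ nB t) % 16777216

theorem pv_pow24 : (16777216 : Nat) = 2 ^ 24 := by norm_num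

theorem nstep_lt (t : Nat) : nstep t < 16777216 := by
  simp only [nstep]; omega

theorem pv_xor_lt (x y : Nat) (hx : x < 16777216) (hy : y < 16777216) : x ^^^ y < 16777216 := by
  rw [pv_pow24] at *
  exact Nat.xor_lt_two_pow hx hy

-- xor combines the low bit and the high part independently
theorem pv_ml1 (a b r s : Nat) (hr : r < 2) (hs : s < 2) :
    (2 * a + r) ^^^ (2 * b + s) = 2 * (a ^^^ b) + (r ^^^ s) := by
  interval_cases r <;> interval_cases s
  · simpa [Nat.bit] using Nat.xor_bit false a false b
  · simpa [Nat.bit] using Nat.xor_bit false a true b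
  · simpa [Nat.bit] using Nat.xor_bit true a false b
  · simpa [Nat.bit] using Nat.xor_bit true a true b

-- complement within k bits is xor with the all-ones mask
theorem pv_compl (k : Nat) : ∀ y : Nat, y < 2 ^ k → y ^^^ (2 ^ k - 1) = 2 ^ k - 1 - y := by
  induction k with
  | zero => intro y hy; interval_cases y; rfl
  | succ k ih =>
      intro y hy
      have hpos : 0 < 2 ^ k := Nat.two_pow_pos k
      have h2 : 2 ^ (k + 1) = 2 * 2 ^ k := by ring
      have hq : y / 2 < 2 ^ k := by omega
      calc y ^^^ (2 ^ (k + 1) - 1)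
          = (2 * (y / 2) + y % 2) ^^^ (2 * (2 ^ k - 1) + 1) := by
            congr 1 <;> omega
        _ = 2 * ((y / 2) ^^^ (2 ^ k - 1)) + ((y % 2) ^^^ 1) :=
            pv_ml1 _ _ _ _ (by omega) (by omega)
        _ = 2 * (2 ^ k - 1 - y / 2) + ((y % 2) ^^^ 1) := by rw [ih _ hq]
        _ = 2 ^ (k + 1) - 1 - y := by
            have hb : (y % 2) ^^^ 1 = 1 - y % 2 := by
              have h : y % 2 = 0 ∨ y % 2 = 1 := by omega
              rcases h with h | h <;> rw [h] <;> rfl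
            rw [hb]; omega

theorem pv_compl24 (y : Nat) (hy : y < 16777216) : y ^^^ 16777215 = 16777215 - y := by
  have h := pv_compl 24 y (by omega)
  norm_num at h
  omega

theorem pv_xor_mod_nat (x y : Nat) :
    (x ^^^ y) % 16777216 = (x % 16777216) ^^^ (y % 16777216) := by
  rw [pv_pow24]; exact Nat.xor_mod_two_pow

-- Python xor followed by % 2^24 only sees the inputs' residues mod 2^24 (mixed-sign case)
theorem pv_mixed (a b : Int) (ha : 0 ≤ a) (hb : b < 0) :
    PySem.Int.mod (PySem.Int.bxor a b) 16777216
      = (((a % 16777216).toNat ^^^ (b % 16777216).toNat : Nat) : Int) := by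
  rw [PySem.Int.mod_eq_emod_of_pos (by norm_num)]
  have hbx : PySem.Int.bxor a b = -(((a.toNat ^^^ (-b - 1).toNat : Nat) : Int)) - 1 := by
    simp only [PySem.Int.bxor, if_pos ha, if_neg (not_le.mpr hb)]
  rw [hbx]
  have hL : (-(((a.toNat ^^^ (-b - 1).toNat : Nat) : Int)) - 1) % 16777216
      = ((16777215 - (a.toNat ^^^ (-b - 1).toNat) % 16777216 : Nat) : Int) := by omega
  rw [hL]
  have hA : (a % 16777216).toNat = a.toNat % 16777216 := by omega
  have hB : (b % 16777216).toNat = 16777215 - (-b - 1).toNat % 16777216 := by omega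
  rw [hA, hB]
  have hp : a.toNat % 16777216 < 16777216 := by omega
  have hq : (-b - 1).toNat % 16777216 < 16777216 := by omega
  congr 1
  rw [pv_xor_mod_nat]
  rw [← pv_compl24 _ (pv_xor_lt _ _ hp hq), ← pv_compl24 _ hq]
  rw [Nat.xor_assoc]

theorem bxor_mod_congr (a b : Int) :
    PySem.Int.mod (PySem.Int.bxor a b) 16777216
      = (((a % 16777216).toNat ^^^ (b % 16777216).toNat : Nat) : Int) := by
  rcases (by omega : 0 ≤ a ∨ a < 0) with ha | ha <;> rcases (by omega : 0 ≤ b ∨ b < 0) with hb | hb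
  · rw [PySem.Int.mod_eq_emod_of_pos (by norm_num)]
    have hbx : PySem.Int.bxor a b = ((a.toNat ^^^ b.toNat : Nat) : Int) := by
      simp only [PySem.Int.bxor, if_pos ha, if_pos hb]
    rw [hbx]
    have hL : (((a.toNat ^^^ b.toNat : Nat) : Int)) % 16777216
        = (((a.toNat ^^^ b.toNat) % 16777216 : Nat) : Int) := by omega
    rw [hL]
    have hA : (a % 16777216).toNat = a.toNat % 16777216 := by omega
    have hB : (b % 16777216).toNat = b.toNat % 16777216 := by omega
    rw [hA, hB]
    congr 1
    exact pv_xor_mod_nat _ _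
  · exact pv_mixed a b ha hb
  · rw [PySem.Int.bxor_comm, pv_mixed b a hb ha, Nat.xor_comm]
  · rw [PySem.Int.mod_eq_emod_of_pos (by norm_num)]
    have hbx : PySem.Int.bxor a b = (((-a - 1).toNat ^^^ (-b - 1).toNat : Nat) : Int) := by
      simp only [PySem.Int.bxor, if_neg (not_le.mpr ha), if_neg (not_le.mpr hb)]
    rw [hbx]
    have hL : ((((-a - 1).toNat ^^^ (-b - 1).toNat : Nat) : Int)) % 16777216
        = ((((-a - 1).toNat ^^^ (-b - 1).toNat) % 16777216 : Nat) : Int) := by omega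
    rw [hL]
    have hA : (a % 16777216).toNat = 16777215 - (-a - 1).toNat % 16777216 := by omega
    have hB : (b % 16777216).toNat = 16777215 - (-b - 1).toNat % 16777216 := by omega
    rw [hA, hB]
    have hp : (-a - 1).toNat % 16777216 < 16777216 := by omega
    have hq : (-b - 1).toNat % 16777216 < 16777216 := by omega
    congr 1
    rw [pv_xor_mod_nat, ← pv_compl24 _ hp, ← pv_compl24 _ hq]
    simp [Nat.xor_comm, Nat.xor_left_comm]

-- ---- A side ----

def astep (s : Int) : Int :=
  let s1 := PySem.Int.mod (PySem.Int.bxor (s * 64) s) 16777216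
  let s2 := PySem.Int.mod (PySem.Int.bxor s1 (PySem.Int.floordiv s1 32)) 16777216
  PySem.Int.mod (PySem.Int.bxor (s2 * 2048) s2) 16777216

theorem portA_eq_foldl (initial : Int) :
    get_2000th_secret initial = (PySem.List.pyRange 0 2000 1).foldl (fun s _ => astep s) initial := rfl

theorem nA_lt (t : Nat) : nA t < 16777216 := by
  rw [nA]; omega

theorem pv_step1 (s : Int) :
    PySem.Int.mod (PySem.Int.bxor (s * 64) s) 16777216
      = ((nA ((s % 16777216).toNat) : Nat) : Int) := by
  have ht : 0 ≤ s % 16777216 := Int.emod_nonneg s (by norm_num)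
  have htl : (s % 16777216).toNat < 16777216 := by omega
  rw [bxor_mod_congr (s * 64) s]
  have h1 : ((s * 64) % 16777216).toNat = ((s % 16777216).toNat * 64) % 16777216 := by omega
  rw [h1]
  congr 1
  rw [nA, Nat.shiftLeft_eq, pv_xor_mod_nat, Nat.mod_eq_of_lt htl]

theorem pv_step2 (x : Nat) (hx : x < 16777216) :
    PySem.Int.mod (PySem.Int.bxor ((x : Nat) : Int) (PySem.Int.floordiv ((x : Nat) : Int) 32)) 16777216
      = (((x ^^^ (x >>> 5)) % 16777216 : Nat) : Int) := by
  have hf : PySem.Int.floordiv ((x : Nat) : Int) 32 = ((x / 32 : Nat) : Int) := by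
    exact_mod_cast PySem.Int.floordiv_natCast x 32
  rw [hf, bxor_mod_congr]
  have h2 : ((((x : Nat) : Int)) % 16777216).toNat = x := by omega
  have h3 : ((((x / 32 : Nat) : Int)) % 16777216).toNat = x / 32 := by
    have : x / 32 ≤ x := Nat.div_le_self _ _
    omega
  rw [h2, h3]
  congr 1
  rw [Nat.shiftRight_eq_div_pow, pv_xor_mod_nat, Nat.mod_eq_of_lt hx,
    Nat.mod_eq_of_lt (by omega : x / 2 ^ 5 < 16777216)]
  norm_num

theorem pv_step3 (x : Nat) (hx : x < 16777216) :
    PySem.Int.mod (PySem.Int.bxor (((x : Nat) : Int) * 2048) ((x : Nat) : Int)) 16777216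
      = ((((x <<< 11) ^^^ x) % 16777216 : Nat) : Int) := by
  rw [bxor_mod_congr]
  have h4 : ((((x : Nat) : Int)) * 2048 % 16777216).toNat = (x * 2048) % 16777216 := by omega
  have h5 : ((((x : Nat) : Int)) % 16777216).toNat = x := by omega
  rw [h4, h5]
  congr 1
  rw [Nat.shiftLeft_eq, pv_xor_mod_nat, Nat.mod_eq_of_lt hx]

theorem stepA_eq (s : Int) : astep s = ((nstep ((s % 16777216).toNat) : Nat) : Int) := by
  simp only [astep]
  rw [pv_step1 s, pv_step2 _ (nA_lt _), pv_step3 _ (by omega)]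
  rfl

theorem foldl_const_iterate (f : Int → Int) (l : List Int) (s : Int) :
    l.foldl (fun x _ => f x) s = f^[l.length] s := by
  induction l generalizing s with
  | nil => rfl
  | cons x xs ih => simp [List.foldl_cons, ih, Function.iterate_succ_apply]

theorem iterA (k : Nat) : ∀ m : Nat, m < 16777216 →
    astep^[k] ((m : Nat) : Int) = ((nstep^[k] m : Nat) : Int) := by
  induction k with
  | zero => intro m _; rfl
  | succ k ih =>
      intro m hm
      rw [Function.iterate_succ_apply, Function.iterate_succ_apply]
      have h1 : astep ((m : Nat) : Int) = ((nstep m : Nat) : Int) := by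
        rw [stepA_eq]
        congr 2
        omega
      rw [h1, ih _ (nstep_lt m)]

theorem A_eq (initial : Int) :
    get_2000th_secret initial = ((nstep^[2000] ((initial % 16777216).toNat) : Nat) : Int) := by
  rw [portA_eq_foldl, foldl_const_iterate]
  have hlen : (PySem.List.pyRange 0 2000 1).length = 2000 := by
    rw [PySem.List.length_pyRange_one]; rfl
  rw [hlen, show (2000 : Nat) = 1999 + 1 from rfl, Function.iterate_add_apply]
  rw [show astep^[1] initial = astep initial from rfl, stepA_eq]
  rw [iterA 1999 _ (nstep_lt _)]
  rw [← Function.iterate_succ_apply]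

-- ---- B side ----

theorem pv_and_mask (y : Nat) : y &&& 16777215 = y % 16777216 := by
  have h := Nat.and_two_pow_sub_one_eq_mod y 24
  norm_num at h
  exact h

theorem bandMask (a : Int) :
    PySem.Int.band a pvMASK = (((a % 16777216).toNat : Nat) : Int) := by
  have hm : (0 : Int) ≤ pvMASK := by norm_num [pvMASK]
  rcases (by omega : 0 ≤ a ∨ a < 0) with ha | ha
  · have hv : PySem.Int.band a pvMASK = ((a.toNat &&& pvMASK.toNat : Nat) : Int) := by
      simp only [PySem.Int.band, if_pos ha, if_pos hm]
    rw [hv]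
    have hmn : pvMASK.toNat = 16777215 := rfl
    rw [hmn]
    rw [pv_and_mask]
    congr 1
    omega
  · have hv : PySem.Int.band a pvMASK
        = ((pvMASK.toNat - (pvMASK.toNat &&& (-a - 1).toNat) : Nat) : Int) := by
      simp only [PySem.Int.band, if_neg (not_le.mpr ha), if_pos hm]
    rw [hv]
    have hmn : pvMASK.toNat = 16777215 := rfl
    rw [hmn]
    rw [Nat.and_comm, pv_and_mask]
    congr 1
    omega

theorem castShl (m k : Nat) : ((m : Int) <<< k) = ((m <<< k : Nat) : Int) := by
  rw [Int.shiftLeft_eq, Nat.shiftLeft_eq]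
  push_cast
  ring

theorem castShr (m k : Nat) : ((m : Int) >>> k) = ((m >>> k : Nat) : Int) := rfl

theorem bandMask_nat (x : Nat) :
    PySem.Int.band ((x : Nat) : Int) pvMASK = ((x % 16777216 : Nat) : Int) := by
  rw [bandMask]
  congr 1

theorem stepB_eq (m : Nat) : pvStep ((m : Nat) : Int) = ((nstep m : Nat) : Int) := by
  simp only [pvStep]
  rw [castShl, PySem.Int.bxor_natCast, bandMask_nat]
  have e1 : (m <<< 6 ^^^ m) % 16777216 = nA m := rfl
  rw [e1, castShr, PySem.Int.bxor_natCast, bandMask_nat]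
  have e2 : (nA m >>> 5 ^^^ nA m) % 16777216 = nB m := by
    rw [nB, Nat.xor_comm]
  rw [e2, castShl, PySem.Int.bxor_natCast, bandMask_nat]
  rfl

def NLin (g : Nat → Nat) : Prop := ∀ x y, g (x ^^^ y) = g x ^^^ g y
def NBnd (g : Nat → Nat) : Prop := ∀ x, x < 16777216 → g x < 16777216
def pvRep (cols : List Int) (g : Nat → Nat) : Prop :=
  cols = (List.range 24).map (fun i => ((g (2 ^ i) : Nat) : Int))

theorem NLin_zero (g : Nat → Nat) (hg : NLin g) : g 0 = 0 := by
  have h := hg 0 0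
  simp only [Nat.xor_self] at h
  omega

theorem pv_two_mul_xor (x y : Nat) : 2 * (x ^^^ y) = 2 * x ^^^ 2 * y := by
  have h := pv_ml1 x y 0 0 (by omega) (by omega)
  simpa using h.symm

theorem nA_lin : ∀ x y, nA (x ^^^ y) = nA x ^^^ nA y := by
  intro x y
  simp only [nA]
  rw [Nat.shiftLeft_xor_distrib]
  have h : (x <<< 6 ^^^ y <<< 6) ^^^ (x ^^^ y) = (x <<< 6 ^^^ x) ^^^ (y <<< 6 ^^^ y) := by
    simp [Nat.xor_assoc, Nat.xor_comm, Nat.xor_left_comm]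
  rw [h, pv_xor_mod_nat]

theorem nB_lin : ∀ x y, nB (x ^^^ y) = nB x ^^^ nB y := by
  intro x y
  simp only [nB]
  rw [nA_lin, Nat.shiftRight_xor_distrib]
  have h : (nA x ^^^ nA y) ^^^ (nA x >>> 5 ^^^ nA y >>> 5)
      = (nA x ^^^ nA x >>> 5) ^^^ (nA y ^^^ nA y >>> 5) := by
    simp [Nat.xor_assoc, Nat.xor_comm, Nat.xor_left_comm]
  rw [h, pv_xor_mod_nat]

theorem nstep_lin : NLin nstep := by
  intro x y
  simp only [nstep]
  rw [nB_lin, Nat.shiftLeft_xor_distrib]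
  have h : (nB x <<< 11 ^^^ nB y <<< 11) ^^^ (nB x ^^^ nB y)
      = (nB x <<< 11 ^^^ nB x) ^^^ (nB y <<< 11 ^^^ nB y) := by
    simp [Nat.xor_assoc, Nat.xor_comm, Nat.xor_left_comm]
  rw [h, pv_xor_mod_nat]

theorem pv_nsplit (n : Nat) : (2 * (n / 2)) ^^^ (n % 2) = n := by
  have h := pv_ml1 (n / 2) 0 0 (n % 2) (by omega) (by omega)
  simp only [Nat.mul_zero, Nat.add_zero, Nat.zero_add, Nat.xor_zero, Nat.zero_xor] at h
  omega

theorem apply_aux (k : Nat) : ∀ (g : Nat → Nat), NLin g → ∀ (n r : Nat), n < 2 ^ k →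
    (((List.range k).map (fun i => ((g (2 ^ i) : Nat) : Int))).foldl pvApplyF
      (((r : Nat) : Int), ((n : Nat) : Int))).1 = ((r ^^^ g n : Nat) : Int) := by
  induction k with
  | zero =>
      intro g hg n r hn
      have hn0 : n = 0 := by omega
      subst hn0
      simp [NLin_zero g hg]
  | succ k ih =>
      intro g hg n r hn
      rw [List.range_succ_eq_map, List.map_cons, List.map_map, List.foldl_cons]
      have hstep : pvApplyF (((r : Nat) : Int), ((n : Nat) : Int)) ((g (2 ^ 0) : Nat) : Int)
          = (((if n % 2 = 1 then r ^^^ g 1 else r : Nat) : Int), ((n / 2 : Nat) : Int)) := by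
        simp only [pvApplyF, pow_zero]
        have hb : PySem.Int.band ((n : Nat) : Int) 1 = ((n % 2 : Nat) : Int) := by
          rw [PySem.Int.band_one]
          exact_mod_cast PySem.Int.mod_natCast n 2
        rw [hb]
        simp only [Prod.mk.injEq]
        refine ⟨?_, rfl⟩
        by_cases hodd : n % 2 = 1
        · rw [if_pos (Int.natCast_ne_zero.mpr (by omega)), if_pos hodd, PySem.Int.bxor_natCast]
        · have h0 : n % 2 = 0 := by omega
          simp [h0]
      rw [hstep]
      have hfun : ((fun i => ((g (2 ^ i) : Nat) : Int)) ∘ Nat.succ)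
          = (fun i => (((fun x => g (2 * x)) (2 ^ i) : Nat) : Int)) := by
        funext i
        simp only [Function.comp]
        congr 2
        rw [pow_succ]
        ring
      rw [hfun]
      have hg' : NLin (fun x => g (2 * x)) := by
        intro x y
        simp only []
        rw [pv_two_mul_xor, hg]
      have hn2 : n / 2 < 2 ^ k := by
        have : 2 ^ (k + 1) = 2 * 2 ^ k := by ring
        omega
      rw [ih (fun x => g (2 * x)) hg' (n / 2) (if n % 2 = 1 then r ^^^ g 1 else r) hn2]
      congr 1
      have hgn : g n = g (2 * (n / 2)) ^^^ g (n % 2) := by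
        rw [← hg, pv_nsplit]
      by_cases hodd : n % 2 = 1
      · rw [if_pos hodd]
        rw [hgn, hodd]
        simp [Nat.xor_assoc, Nat.xor_comm]
      · have h0 : n % 2 = 0 := by omega
        rw [if_neg hodd, hgn, h0, NLin_zero g hg, Nat.xor_zero]

theorem apply_rep (cols : List Int) (g : Nat → Nat) (hg : NLin g) (hrep : pvRep cols g)
    (n : Nat) (hn : n < 16777216) : pvApply cols ((n : Nat) : Int) = ((g n : Nat) : Int) := by
  rw [pvApply, hrep]
  have h := apply_aux 24 g hg n 0 (by omega)
  simpa using h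

theorem matmul_rep (ca cb : List Int) (g h : Nat → Nat) (hg : NLin g)
    (hhb : NBnd h) (hrg : pvRep ca g) (hrh : pvRep cb h) :
    pvRep (pvMatMul ca cb) (fun n => g (h n)) := by
  rw [pvRep, hrh, pvMatMul, List.map_map]
  apply List.map_congr_left
  intro i hi
  simp only [List.mem_range] at hi
  simp only [Function.comp]
  refine apply_rep ca g hg hrg (h (2 ^ i)) (hhb _ ?_)
  have : (2 : Nat) ^ i < 2 ^ 24 := Nat.pow_lt_pow_right (by norm_num) hi
  omega

theorem NLin_iterate (k : Nat) : NLin (nstep^[k]) := by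
  induction k with
  | zero => intro x y; simp
  | succ k ih =>
      intro x y
      rw [Function.iterate_succ_apply', Function.iterate_succ_apply',
        Function.iterate_succ_apply', ih x y, nstep_lin _ _]

theorem NBnd_iterate (k : Nat) : NBnd (nstep^[k]) := by
  induction k with
  | zero => intro x hx; simpa using hx
  | succ k _ =>
      intro x hx
      rw [Function.iterate_succ_apply']
      exact nstep_lt _

theorem cast_one_shl (i : Nat) : ((1 : Int) <<< i) = (((2 : Nat) ^ i : Nat) : Int) := by
  rw [Int.shiftLeft_eq]
  push_cast
  ring

theorem repT : pvRep pvT nstep := by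
  rw [pvRep, pvT]
  apply List.map_congr_left
  intro i _
  rw [cast_one_shl, stepB_eq]

theorem pow_rep (e : Nat) : pvRep (pvMatPow pvT e) (nstep^[e]) := by
  induction e using Nat.strong_induction_on with
  | _ e ih =>
    rw [pvMatPow]
    by_cases h : e = 0
    · subst h
      rw [pvRep]
      apply List.map_congr_left
      intro i _
      rw [cast_one_shl, Function.iterate_zero_apply]
    · simp only [dif_neg h]
      have ihh := ih (e / 2) (Nat.div_lt_self (Nat.pos_of_ne_zero h) one_lt_two)
      have hmul := matmul_rep _ _ _ _ (NLin_iterate (e / 2)) (NBnd_iterate (e / 2)) ihh ihh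
      have hcomp : (fun n => nstep^[e / 2] (nstep^[e / 2] n)) = nstep^[e / 2 + e / 2] := by
        funext n
        rw [Function.iterate_add_apply]
      rw [hcomp] at hmul
      by_cases hodd : e % 2 = 1
      · rw [if_pos hodd]
        have hfin := matmul_rep _ _ _ _ nstep_lin (NBnd_iterate (e / 2 + e / 2)) repT hmul
        have h2 : (fun n => nstep (nstep^[e / 2 + e / 2] n)) = nstep^[e] := by
          funext n
          conv_rhs => rw [show e = e / 2 + e / 2 + 1 from by omega]
          rw [Function.iterate_succ_apply']
        rwa [h2] at hfin
      · rw [if_neg hodd]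
        have h2 : e / 2 + e / 2 = e := by omega
        rwa [h2] at hmul

theorem B_eq (initial : Int) :
    get_2000th_secret_alt initial = ((nstep^[2000] ((initial % 16777216).toNat) : Nat) : Int) := by
  rw [get_2000th_secret_alt, bandMask]
  exact apply_rep _ _ (NLin_iterate 2000) (pow_rep 2000) _ (by omega)

-- ===== VERDICT (by name: the statement is the Claim_ definition above) =====
theorem get_2000th_secret_spec : Claim_equal_get_2000th_secret := by
  intro initial _
  unfold Spec_get_2000th_secret
  rw [A_eq, B_eq]
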